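-- pv_equiv track=rewrite | github.com/alexli2222/Eficiency | modules/humantype.py | _word_before
-- ===== SOURCE A (Python) =====
-- def _word_before(text: str, pos: int) -> str:
--     """Return the alphabetic word ending just before text[pos] (pos is a space)."""
--     end = pos
--     while end > 0 and not text[end - 1].isalpha():
--         end -= 1
--     start = end
--     while start > 0 and text[start - 1].isalpha():
--         start -= 1
--     return text[start:end].lower()
-- ===== SOURCE B (Python) =====
-- def _word_before(text: str, pos: int) -> str:
--     """Return the alphabetic word ending just before text[pos] (pos is a space)."""
--     last = ''
--     buf = []
--     for i in range(pos):
--         c = text[i]  # explicit indexing: raises IndexError when pos > len(text), like A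
--         if c.isalpha():
--             buf.append(c)
--         else:
--             if buf:
--                 last = ''.join(buf)
--             buf = []
--     if buf:
--         last = ''.join(buf)
--     return last.lower()
-- ===== Notes on version B (the rewrite author's own statement) =====
-- stated objective: alternative
-- what changed: Replaced A's two backward while-loops that locate the boundaries of the trailing word with a single forward pass over the prefix that accumulates the current alphabetic run and keeps the last completed one.
import Mathlib
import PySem

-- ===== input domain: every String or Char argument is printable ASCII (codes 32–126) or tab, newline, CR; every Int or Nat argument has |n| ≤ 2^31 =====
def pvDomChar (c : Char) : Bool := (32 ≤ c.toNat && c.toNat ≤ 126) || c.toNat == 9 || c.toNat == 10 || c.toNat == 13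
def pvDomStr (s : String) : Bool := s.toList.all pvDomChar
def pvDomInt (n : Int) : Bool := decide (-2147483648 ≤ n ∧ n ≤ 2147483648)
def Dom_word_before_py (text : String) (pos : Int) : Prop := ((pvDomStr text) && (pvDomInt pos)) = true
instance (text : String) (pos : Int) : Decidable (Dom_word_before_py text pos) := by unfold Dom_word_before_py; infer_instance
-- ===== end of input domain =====

-- B replaces A's two backward boundary-finding loops with one forward accumulator pass; equivalence on pos ≤ len(text) (A raises IndexError beyond).


-- ===== PORT A =====
-- `while end > 0 and not text[end-1].isalpha(): end -= 1`, as structural recursion on end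
def pvFindEnd (cs : List Char) : Nat → Nat
  | 0 => 0
  | e + 1 => if ¬ (PySem.Chars.isalpha (cs.getD e ' ') = true) then pvFindEnd cs e else e + 1

-- `while start > 0 and text[start-1].isalpha(): start -= 1`
def pvFindStart (cs : List Char) : Nat → Nat
  | 0 => 0
  | s + 1 => if PySem.Chars.isalpha (cs.getD s ' ') = true then pvFindStart cs s else s + 1

def word_before_py (text : String) (pos : Int) : String :=
  let cs := text.toList
  if pos ≤ 0 then
    -- both loop guards (end > 0 / start > 0) are false at once: end = start = pos, text[pos:pos] = ''
    String.ofList (PySem.Chars.lower (PySem.List.slice cs (some pos) (some pos)))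
  else
    let e := pvFindEnd cs pos.toNat
    let s := pvFindStart cs e
    String.ofList (PySem.Chars.lower (PySem.List.slice cs (some (s : Int)) (some (e : Int))))

-- ===== PORT B =====
-- loop body: on an alpha char extend buf, otherwise flush buf into last
def pvStep (st : List Char × List Char) (c : Char) : List Char × List Char :=
  if PySem.Chars.isalpha c = true then (st.1, st.2 ++ [c])
  else (if st.2 ≠ [] then st.2 else st.1, [])

def word_before_py_alt (text : String) (pos : Int) : String :=
  let cs := text.toList
  -- `for i in range(pos): c = text[i]` ranges over the prefix of length pos (Pre_ makes every index valid)
  let st := (cs.take pos.toNat).foldl pvStep ([], [])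
  let last := if st.2 ≠ [] then st.2 else st.1
  String.ofList (PySem.Chars.lower last)

-- ===== PRECONDITION & SPEC =====
-- Pre_ excludes exactly pos > len(text), where both Pythons raise IndexError.
def Pre_word_before_py (text : String) (pos : Int) : Prop := pos ≤ (text.toList.length : Int)
instance (text : String) (pos : Int) : Decidable (Pre_word_before_py text pos) := by unfold Pre_word_before_py; infer_instance
def pvWitness_word_before_py : String × Int := ("ab cd ", 6)
def Spec_word_before_py (text : String) (pos : Int) (out : String) : Prop := out = word_before_py_alt text pos
instance (text : String) (pos : Int) (out : String) : Decidable (Spec_word_before_py text pos out) := by unfold Spec_word_before_py; infer_instance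

-- ===== CLAIM (what is proved, stated in full; the proofs are below) =====
def Claim_equal_word_before_py : Prop := ∀ (text : String) (pos : Int), Dom_word_before_py text pos → Pre_word_before_py text pos → Spec_word_before_py text pos (word_before_py text pos)

-- ===== LEMMAS AND PROOFS =====

theorem pvFindEnd_le (cs : List Char) (n : Nat) : pvFindEnd cs n ≤ n := by
  induction n with
  | zero => simp [pvFindEnd]
  | succ e ih => simp only [pvFindEnd]; split <;> omega

theorem pvFindStart_le (cs : List Char) (n : Nat) : pvFindStart cs n ≤ n := by
  induction n with
  | zero => simp [pvFindStart]
  | succ e ih => simp only [pvFindStart]; split <;> omega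

theorem pvFindEnd_succ (cs : List Char) (e : Nat) :
    pvFindEnd cs (e + 1) = if ¬ (PySem.Chars.isalpha (cs[e]?.getD ' ') = true) then pvFindEnd cs e else e + 1 := by
  simp only [pvFindEnd, List.getD_eq_getElem?_getD]

theorem pvFindStart_succ (cs : List Char) (s : Nat) :
    pvFindStart cs (s + 1) = if PySem.Chars.isalpha (cs[s]?.getD ' ') = true then pvFindStart cs s else s + 1 := by
  simp only [pvFindStart, List.getD_eq_getElem?_getD]

theorem pvFindStart_lt_imp (cs : List Char) (n : Nat) (h : pvFindStart cs n < n) :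
    pvFindEnd cs n = n := by
  cases n with
  | zero => omega
  | succ m =>
    rw [pvFindStart_succ] at h
    by_cases ha : PySem.Chars.isalpha (cs[m]?.getD ' ') = true
    · rw [pvFindEnd_succ, if_neg (not_not_intro ha)]
    · rw [if_neg ha] at h; omega

-- A's result (as a char list) at boundary n
def pvR (cs : List Char) (n : Nat) : List Char :=
  (cs.take (pvFindEnd cs n)).drop (pvFindStart cs (pvFindEnd cs n))

theorem pvDrop_take_nil (cs : List Char) (m s : Nat) (hm : m ≤ cs.length)
    (hb : (cs.take m).drop s = []) (hs : s ≤ m) : s = m := by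
  have hl : ((cs.take m).drop s).length = 0 := by rw [hb]; rfl
  rw [List.length_drop, List.length_take] at hl
  omega

-- the forward fold's invariant: buf is the trailing alpha run of the prefix, last is A's answer at its start
theorem pvFold_inv (cs : List Char) (n : Nat) (hn : n ≤ cs.length) :
    (cs.take n).foldl pvStep ([], []) =
      (pvR cs (pvFindStart cs n), (cs.take n).drop (pvFindStart cs n)) := by
  induction n with
  | zero => simp [pvFindStart, pvR, pvFindEnd]
  | succ m ih =>
    have hm : m ≤ cs.length := by omega
    have hlt : m < cs.length := by omega
    have hS := pvFindStart_le cs m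
    have htk : cs.take (m + 1) = cs.take m ++ [cs[m]?.getD ' '] := by
      rw [List.take_add_one]
      simp [List.getElem?_eq_getElem hlt]
    rw [htk, List.foldl_append, ih hm]
    simp only [List.foldl_cons, List.foldl_nil]
    by_cases ha : PySem.Chars.isalpha (cs[m]?.getD ' ') = true
    · have hS1 : pvFindStart cs (m + 1) = pvFindStart cs m := by
        rw [pvFindStart_succ, if_pos ha]
      have hdrop : (cs.take m ++ [cs[m]?.getD ' ']).drop (pvFindStart cs m)
          = (cs.take m).drop (pvFindStart cs m) ++ [cs[m]?.getD ' '] := by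
        apply List.drop_append_of_le_length
        simpa [List.length_take, Nat.min_eq_left hm] using hS
      rw [hS1, hdrop]
      simp [pvStep, ha]
    · have hS1 : pvFindStart cs (m + 1) = m + 1 := by
        rw [pvFindStart_succ, if_neg ha]
      have hE1 : pvFindEnd cs (m + 1) = pvFindEnd cs m := by
        rw [pvFindEnd_succ, if_pos (by simp [ha])]
      have hdropnil : (cs.take m ++ [cs[m]?.getD ' ']).drop (m + 1) = [] := by
        apply List.drop_eq_nil_of_le
        simp [List.length_take]
      rw [hS1, hdropnil]
      by_cases hb : (cs.take m).drop (pvFindStart cs m) = []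
      · have hSm : pvFindStart cs m = m := pvDrop_take_nil cs m (pvFindStart cs m) hm hb hS
        simp [pvStep, ha, pvR, hE1, hSm]
      · have hSlt : pvFindStart cs m < m := by
          rcases lt_or_eq_of_le hS with h | h
          · exact h
          · exact absurd (by rw [h]; apply List.drop_eq_nil_of_le; simp [List.length_take]) hb
        have hEm : pvFindEnd cs m = m := pvFindStart_lt_imp cs m hSlt
        simp [pvStep, ha, hb, pvR, hE1, hEm]

theorem pvResult_eq (cs : List Char) (n : Nat) (hn : n ≤ cs.length) :
    (if ((cs.take n).foldl pvStep ([], [])).2 ≠ [] then ((cs.take n).foldl pvStep ([], [])).2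
     else ((cs.take n).foldl pvStep ([], [])).1) = pvR cs n := by
  rw [pvFold_inv cs n hn]
  have hS := pvFindStart_le cs n
  by_cases hb : (cs.take n).drop (pvFindStart cs n) = []
  · have hSn : pvFindStart cs n = n := pvDrop_take_nil cs n (pvFindStart cs n) hn hb hS
    simp [pvR, hSn]
  · have hSlt : pvFindStart cs n < n := by
      rcases lt_or_eq_of_le hS with h | h
      · exact h
      · exact absurd (by rw [h]; apply List.drop_eq_nil_of_le; simp [List.length_take]) hb
    have hEn : pvFindEnd cs n = n := pvFindStart_lt_imp cs n hSlt
    simp [hb, pvR, hEn]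

-- ===== VERDICT (by name: the statement is the Claim_ definition above) =====
theorem word_before_py_spec : Claim_equal_word_before_py := by
  intro text pos _hdom hpre
  unfold Spec_word_before_py word_before_py word_before_py_alt
  unfold Pre_word_before_py at hpre
  set cs := text.toList with hcs
  by_cases hp : pos ≤ 0
  · have h0 : pos.toNat = 0 := Int.toNat_of_nonpos hp
    have hsl : PySem.List.slice cs (some pos) (some pos) = ([] : List Char) := by
      apply List.eq_nil_of_length_eq_zero
      rw [PySem.List.length_slice]; omega
    simp [hp, h0, hsl, PySem.Chars.lower]
  · simp only [if_neg hp]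
    set n := pos.toNat with hn
    have hnl : n ≤ cs.length := by rw [hn]; omega
    have hE := pvFindEnd_le cs n
    have hS := pvFindStart_le cs (pvFindEnd cs n)
    have hsl : PySem.List.slice cs (some ((pvFindStart cs (pvFindEnd cs n) : Nat) : Int))
        (some ((pvFindEnd cs n : Nat) : Int))
        = (cs.take (pvFindEnd cs n)).drop (pvFindStart cs (pvFindEnd cs n)) := by
      rw [PySem.List.slice_natCast, List.drop_take]
    rw [pvResult_eq cs n hnl]
    unfold pvR
    rw [hsl]
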